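-- pv_equiv track=rewrite | github.com/dmakhervaks/medical-contradictions | pubmed/process_pubmed.py | does_sentence_contain_phrase_not_in_order
-- ===== SOURCE A (Python) =====
-- def does_sentence_contain_phrase_not_in_order(sent, phrase_to_tokenized_phrase_map):
--     phrases=[]
--     for phrase, word_tokens in phrase_to_tokenized_phrase_map.items():
--         all_found = True
--         for word in word_tokens:
--             # heuristic for whole-word-matching
--             if len(word) < 3:
--                 word = " " + word + " "
--             if word not in sent:
--                 all_found = False
--         if all_found:
--             phrases.append(phrase)
--     return phrases
-- ===== SOURCE B (Python) =====
-- def does_sentence_contain_phrase_not_in_order(sent, phrase_to_tokenized_phrase_map):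
--     items = list(phrase_to_tokenized_phrase_map.items())
--     # inverted index: word -> indices of the phrases whose token list contains it
--     word_to_phrases = {}
--     for i, (_, toks) in enumerate(items):
--         for w in toks:
--             word_to_phrases.setdefault(w, []).append(i)
--     # one substring scan per DISTINCT word; a missing word knocks out all its phrases
--     failed = [False] * len(items)
--     for w, idxs in word_to_phrases.items():
--         key = " " + w + " " if len(w) < 3 else w
--         if key not in sent:
--             for i in idxs:
--                 failed[i] = True
--     return [phrase for (phrase, _), bad in zip(items, failed) if not bad]
-- ===== Notes on version B (the rewrite author's own statement) =====
-- stated objective: faster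
-- what changed: B builds an inverted index word->phrase indices, scans the sentence once per DISTINCT word and scatters each missing word's failure onto its phrases via a boolean flag array, then emits the unflagged phrases, instead of A's per-phrase re-scan of the sentence for every token.
import Mathlib
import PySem

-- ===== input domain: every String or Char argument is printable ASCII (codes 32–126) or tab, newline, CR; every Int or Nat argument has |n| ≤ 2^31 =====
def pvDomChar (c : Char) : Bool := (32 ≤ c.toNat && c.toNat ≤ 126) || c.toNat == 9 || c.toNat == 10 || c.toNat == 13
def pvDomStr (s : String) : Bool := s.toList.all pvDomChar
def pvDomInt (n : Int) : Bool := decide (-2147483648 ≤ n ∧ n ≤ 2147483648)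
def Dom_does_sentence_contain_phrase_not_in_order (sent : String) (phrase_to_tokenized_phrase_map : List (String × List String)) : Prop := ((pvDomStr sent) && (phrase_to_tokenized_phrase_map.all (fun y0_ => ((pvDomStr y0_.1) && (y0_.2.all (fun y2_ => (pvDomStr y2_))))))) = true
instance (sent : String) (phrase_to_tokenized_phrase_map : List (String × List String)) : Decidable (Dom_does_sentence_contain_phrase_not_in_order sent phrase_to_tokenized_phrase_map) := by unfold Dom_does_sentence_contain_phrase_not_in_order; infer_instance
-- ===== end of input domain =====

-- B is faster and structurally inverted: it builds an inverted index word -> phrase indices,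
-- scans the sentence once per DISTINCT word, scatters each missing word's failure onto its
-- phrases through a boolean flag array, and emits the unflagged phrases.

-- ===== PORT A =====
def does_sentence_contain_phrase_not_in_order (sent : String) (phrase_to_tokenized_phrase_map : List (String × List String)) : List String :=
  phrase_to_tokenized_phrase_map.foldl (fun phrases p =>
    let all_found := p.2.foldl (fun all_found word =>
      -- heuristic for whole-word-matching: word = " " + word + " "
      let word := if PySem.Str.len word < 3 then String.ofList (' ' :: word.toList ++ [' ']) else word
      if PySem.Str.isIn word sent then all_found else false) true
    if all_found then phrases ++ [p.1] else phrases) []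

-- ===== PORT B =====
def does_sentence_contain_phrase_not_in_order_alt (sent : String) (phrase_to_tokenized_phrase_map : List (String × List String)) : List String :=
  -- inverted index: word -> indices of the phrases whose token list contains it
  let word_to_phrases : PySem.Dict String (List Int) :=
    (PySem.List.enumerate phrase_to_tokenized_phrase_map).foldl
      (fun d p => p.2.2.foldl (fun d w => d.modify w [] (· ++ [p.1])) d) PySem.Dict.empty
  -- one substring scan per distinct word; a missing word knocks out all its phrases
  let failed :=
    word_to_phrases.items.foldl (fun failed q =>
      let key := if PySem.Str.len q.1 < 3 then String.ofList (' ' :: q.1.toList ++ [' ']) else q.1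
      if PySem.Str.isIn key sent then failed
      else q.2.foldl (fun f i => PySem.List.pySetD f i true) failed)
      (List.replicate phrase_to_tokenized_phrase_map.length false)
  ((phrase_to_tokenized_phrase_map.zip failed).filter (fun q => !q.2)).map (fun q => q.1.1)

-- ===== PRECONDITION & SPEC =====
def Spec_does_sentence_contain_phrase_not_in_order (sent : String) (phrase_to_tokenized_phrase_map : List (String × List String)) (out : List String) : Prop := out = does_sentence_contain_phrase_not_in_order_alt sent phrase_to_tokenized_phrase_map
instance (sent : String) (phrase_to_tokenized_phrase_map : List (String × List String)) (out : List String) : Decidable (Spec_does_sentence_contain_phrase_not_in_order sent phrase_to_tokenized_phrase_map out) := by unfold Spec_does_sentence_contain_phrase_not_in_order; infer_instance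

-- ===== CLAIM (what is proved, stated in full; the proofs are below) =====
def Claim_equal_does_sentence_contain_phrase_not_in_order : Prop := ∀ (sent : String) (phrase_to_tokenized_phrase_map : List (String × List String)), Dom_does_sentence_contain_phrase_not_in_order sent phrase_to_tokenized_phrase_map → Spec_does_sentence_contain_phrase_not_in_order sent phrase_to_tokenized_phrase_map (does_sentence_contain_phrase_not_in_order sent phrase_to_tokenized_phrase_map)

-- ===== LEMMAS AND PROOFS =====

-- the per-word membership test both programs ultimately perform
def pvCheck (sent w : String) : Bool :=
  PySem.Str.isIn (if PySem.Str.len w < 3 then String.ofList (' ' :: w.toList ++ [' ']) else w) sent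

-- the flat (word, phrase-index) pair list B's nested index-building loop traverses
def pvPairs (m : List (String × List String)) : List (String × Int) :=
  (PySem.List.enumerate m).flatMap (fun p => p.2.2.map (fun w => (w, p.1)))

-- A's inner loop over the tokens is List.all of the membership test
theorem inner_foldl_eq_all (sent : String) (l : List String) (b : Bool) :
    l.foldl (fun all_found word =>
      let word := if PySem.Str.len word < 3 then String.ofList (' ' :: word.toList ++ [' ']) else word
      if PySem.Str.isIn word sent then all_found else false) b
    = (b && l.all (fun w => pvCheck sent w)) := by
  induction l generalizing b with
  | nil => simp
  | cons x t ih =>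
    simp only [List.foldl_cons, List.all_cons, ih, pvCheck]
    cases h : PySem.Str.isIn (if PySem.Str.len x < 3 then String.ofList (' ' :: x.toList ++ [' ']) else x) sent <;> simp_all

-- membership in enumerate
theorem mem_enumerate_iff {α : Type} (m : List α) (s i : Int) (x : α) :
    (i, x) ∈ PySem.List.enumerate m s ↔ ∃ j : Nat, j < m.length ∧ i = s + j ∧ m[j]? = some x := by
  induction m generalizing s with
  | nil => simp [PySem.List.enumerate_nil]
  | cons a t ih =>
    rw [PySem.List.enumerate_cons]
    simp only [List.mem_cons, ih, Prod.mk.injEq]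
    constructor
    · rintro (⟨hi, hx⟩ | ⟨j, hj, hi, hx⟩)
      · exact ⟨0, by simp, by omega, by simp [hx]⟩
      · exact ⟨j + 1, by simpa using hj, by push_cast; omega, by simpa using hx⟩
    · rintro ⟨j, hj, hi, hx⟩
      cases j with
      | zero => left; constructor; · omega
                · simpa using hx.symm
      | succ k => right; exact ⟨k, by simpa using hj, by push_cast at hi ⊢; omega, by simpa using hx⟩

-- membership in the flat pair list
theorem mem_pvPairs (m : List (String × List String)) (w : String) (j : Nat) (hj : j < m.length) :
    (w, (j : Int)) ∈ pvPairs m ↔ w ∈ (m[j]).2 := by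
  unfold pvPairs
  simp only [List.mem_flatMap, List.mem_map]
  constructor
  · rintro ⟨p, hp, w', hw', heq⟩
    obtain ⟨hw, hi⟩ := Prod.mk.injEq .. ▸ heq
    obtain ⟨j', hj', hi', hx⟩ := (mem_enumerate_iff m 0 p.1 p.2).mp (by cases p; exact hp)
    have : j' = j := by omega
    subst this
    rw [List.getElem?_eq_getElem hj] at hx
    injection hx with hx
    rw [← hx, hw] at hw'
    exact hw'
  · intro hw
    refine ⟨((j:Int), m[j]), ?_, w, hw, rfl⟩
    exact (mem_enumerate_iff m 0 _ _).mpr ⟨j, hj, by omega, by rw [List.getElem?_eq_getElem hj]⟩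

-- every index in the pair list is a valid position of m
theorem pvPairs_idx_bound (m : List (String × List String)) (w : String) (i : Int)
    (h : (w, i) ∈ pvPairs m) : 0 ≤ i ∧ i < m.length := by
  unfold pvPairs at h
  simp only [List.mem_flatMap, List.mem_map] at h
  obtain ⟨p, hp, w', hw', heq⟩ := h
  obtain ⟨hw, hi⟩ := Prod.mk.injEq .. ▸ heq
  obtain ⟨j, hj, hi', hx⟩ := (mem_enumerate_iff m 0 p.1 p.2).mp (by cases p; exact hp)
  omega

-- the inner setting loop preserves length
theorem length_foldl_pySetD (idxs : List Int) (f : List Bool) :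
    (idxs.foldl (fun f i => PySem.List.pySetD f i true) f).length = f.length := by
  induction idxs generalizing f with
  | nil => rfl
  | cons i t ih => simp [List.foldl_cons, ih, PySem.List.length_pySetD]

-- the inner setting loop: position j becomes true exactly if j occurs in idxs
theorem getD_foldl_pySetD (idxs : List Int) (f : List Bool) (j : Nat)
    (hj : j < f.length) (hb : ∀ i ∈ idxs, 0 ≤ i ∧ i < (f.length : Int)) :
    (idxs.foldl (fun f i => PySem.List.pySetD f i true) f).getD j false
      = (f.getD j false || decide ((j : Int) ∈ idxs)) := by
  induction idxs generalizing f with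
  | nil => simp
  | cons i t ih =>
    obtain ⟨h0, h1⟩ := hb i List.mem_cons_self
    rw [List.foldl_cons, ih _ (by rw [PySem.List.length_pySetD]; exact hj)
        (fun i' hi' => by rw [PySem.List.length_pySetD]; exact hb i' (List.mem_cons_of_mem _ hi'))]
    rw [PySem.List.pySetD_of_nonneg (h := h0)]
    by_cases hji : (j : Int) = i
    · have : i.toNat = j := by omega
      rw [this]
      simp [List.getD_eq_getElem?_getD, List.getElem?_set_self (by omega), hji]
    · have : i.toNat ≠ j := by omega
      simp [List.getD_eq_getElem?_getD, List.getElem?_set_ne this, hji]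

-- the scatter loop over the dict items
theorem getD_scatter (sent : String) (E : List (String × List Int)) (init : List Bool) (j : Nat)
    (hj : j < init.length) (hb : ∀ q ∈ E, ∀ i ∈ q.2, 0 ≤ i ∧ i < (init.length : Int)) :
    (E.foldl (fun failed q =>
      let key := if PySem.Str.len q.1 < 3 then String.ofList (' ' :: q.1.toList ++ [' ']) else q.1
      if PySem.Str.isIn key sent then failed
      else q.2.foldl (fun f i => PySem.List.pySetD f i true) failed) init).getD j false
    = (init.getD j false || E.any (fun q => !pvCheck sent q.1 && decide ((j : Int) ∈ q.2))) := by
  induction E generalizing init with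
  | nil => simp
  | cons q t ih =>
    simp only [List.foldl_cons, List.any_cons]
    by_cases hc : pvCheck sent q.1 = true
    · rw [show (if PySem.Str.isIn (if PySem.Str.len q.1 < 3 then String.ofList (' ' :: q.1.toList ++ [' ']) else q.1) sent then init
            else q.2.foldl (fun f i => PySem.List.pySetD f i true) init) = init from by
          simp [pvCheck] at hc; simp [hc]]
      rw [ih init hj (fun q' hq' => hb q' (List.mem_cons_of_mem _ hq'))]
      simp [hc]
    · rw [show (if PySem.Str.isIn (if PySem.Str.len q.1 < 3 then String.ofList (' ' :: q.1.toList ++ [' ']) else q.1) sent then init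
            else q.2.foldl (fun f i => PySem.List.pySetD f i true) init)
          = q.2.foldl (fun f i => PySem.List.pySetD f i true) init from by
          simp [pvCheck] at hc; simp [hc]]
      rw [ih _ (by rw [length_foldl_pySetD]; exact hj)
          (fun q' hq' => by rw [length_foldl_pySetD]; exact hb q' (List.mem_cons_of_mem _ hq'))]
      rw [getD_foldl_pySetD _ _ _ hj (hb q List.mem_cons_self)]
      simp [hc, Bool.or_assoc]

-- the scatter loop preserves the flag list's length
theorem length_scatter (sent : String) (E : List (String × List Int)) (init : List Bool) :
    (E.foldl (fun failed q =>
      let key := if PySem.Str.len q.1 < 3 then String.ofList (' ' :: q.1.toList ++ [' ']) else q.1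
      if PySem.Str.isIn key sent then failed
      else q.2.foldl (fun f i => PySem.List.pySetD f i true) failed) init).length = init.length := by
  induction E generalizing init with
  | nil => rfl
  | cons q t ih =>
    simp only [List.foldl_cons]
    rw [ih]
    split <;> split <;> first | rfl | exact length_foldl_pySetD _ _

-- the final zip/filter/map pass against the flag list computed from m itself
theorem zip_filter_map (m : List (String × List String)) (g : String × List String → Bool) :
    (((m.zip (m.map (fun p => !g p))).filter (fun q => !q.2)).map (fun q => q.1.1))
      = (m.filter g).map Prod.fst := by
  induction m with
  | nil => rfl
  | cons p t ih =>
    simp only [List.map_cons, List.zip_cons_cons, List.filter_cons]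
    by_cases hg : g p = true <;> simp [hg, ih]

-- ===== VERDICT (by name: the statement is the Claim_ definition above) =====
theorem does_sentence_contain_phrase_not_in_order_spec : Claim_equal_does_sentence_contain_phrase_not_in_order := by
  intro sent m _
  unfold Spec_does_sentence_contain_phrase_not_in_order
  unfold does_sentence_contain_phrase_not_in_order does_sentence_contain_phrase_not_in_order_alt
  simp only []
  -- A side: the accumulating loop is a filter, the inner loop is List.all
  rw [PySem.List.foldl_append_if (f := Prod.fst)
        (p := fun p : String × List String => p.2.foldl (fun all_found word =>
          let word := if PySem.Str.len word < 3 then String.ofList (' ' :: word.toList ++ [' ']) else word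
          if PySem.Str.isIn word sent then all_found else false) true)]
  rw [List.nil_append]
  rw [List.filter_congr (q := fun p : String × List String => p.2.all (fun w => pvCheck sent w))
        (fun p _ => by rw [inner_foldl_eq_all, Bool.true_and])]
  -- B side: the nested index-building loop is the flat fold over pvPairs
  have hwtp : (PySem.List.enumerate m).foldl
      (fun d p => p.2.2.foldl (fun d w => d.modify w [] (· ++ [p.1])) d) PySem.Dict.empty
    = (pvPairs m).foldl (fun d q => d.modify q.1 [] (· ++ [q.2])) PySem.Dict.empty := by
    unfold pvPairs
    rw [List.foldl_flatMap]
    congr 1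
    funext d p
    rw [List.foldl_map]
  rw [hwtp]
  set wtp := (pvPairs m).foldl (fun d q => d.modify q.1 [] (· ++ [q.2])) PySem.Dict.empty with hw
  have hnodup : wtp.keys.Nodup := PySem.Dict.nodup_keys_foldl_modify_key _ Prod.fst _
      (fun _ q => (· ++ [q.2])) _ (by simp)
  have hget : ∀ k, wtp.getD k [] = ((pvPairs m).filter (fun p => p.1 == k)).map (·.2) := fun k => by
    rw [hw, PySem.Dict.getD_foldl_modify_append]
    simp
  have hitems : wtp.items = wtp.keys.map (fun k => (k, wtp.getD k [])) :=
    PySem.Dict.items_eq_map_keys wtp hnodup []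
  have hkeys : ∀ k, k ∈ wtp.keys ↔ k ∈ (pvPairs m).map Prod.fst := fun k => by
    rw [hw, PySem.Dict.keys_foldl_modify_key _ Prod.fst _ (fun _ q => (· ++ [q.2])) _]
    simp [PySem.Set.mem_update]
  have hb : ∀ q ∈ wtp.items, ∀ i ∈ q.2,
      0 ≤ i ∧ i < ((List.replicate m.length false).length : Int) := by
    intro q hq i hi
    rw [hitems] at hq
    obtain ⟨k, hk, rfl⟩ := List.mem_map.mp hq
    rw [hget] at hi
    obtain ⟨p, hp, rfl⟩ := List.mem_map.mp hi
    have hpm : p ∈ pvPairs m := (List.mem_filter.mp hp).1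
    have := pvPairs_idx_bound m p.1 p.2 (by cases p; exact hpm)
    simpa using this
  -- the flag list is exactly the per-phrase failure of A's test
  have hfailed : (wtp.items.foldl (fun failed q =>
      let key := if PySem.Str.len q.1 < 3 then String.ofList (' ' :: q.1.toList ++ [' ']) else q.1
      if PySem.Str.isIn key sent then failed
      else q.2.foldl (fun f i => PySem.List.pySetD f i true) failed)
      (List.replicate m.length false))
    = m.map (fun p => !(p.2.all (fun w => pvCheck sent w))) := by
    apply List.ext_getElem
    · rw [length_scatter]; simp
    · intro j hj hj2
      have hjm : j < m.length := by simpa using hj2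
      rw [← List.getD_eq_getElem _ false hj, ← List.getD_eq_getElem _ false hj2]
      rw [getD_scatter sent _ _ j (by simpa using hjm) hb]
      have hrep : (List.replicate m.length false).getD j false = false := by
        simp [List.getD_eq_getElem?_getD]
      rw [hrep, Bool.false_or]
      rw [List.getD_eq_getElem _ false hj2, List.getElem_map]
      rw [Bool.eq_iff_iff]
      simp only [List.any_eq_true, Bool.and_eq_true, Bool.not_eq_true', decide_eq_true_eq,
        Bool.not_eq_true, List.all_eq_false]
      constructor
      · rintro ⟨q, hq, hC, hjq⟩
        rw [hitems] at hq
        obtain ⟨k, hk, rfl⟩ := List.mem_map.mp hq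
        rw [hget] at hjq
        obtain ⟨p, hp, hpj⟩ := List.mem_map.mp hjq
        obtain ⟨hpm, hpk⟩ := List.mem_filter.mp hp
        have hk' : p.1 = k := by simpa using hpk
        have : (k, (j : Int)) ∈ pvPairs m := by
          have : p = (k, (j : Int)) := by
            cases p; simp_all
          rw [← this]; exact hpm
        exact ⟨k, (mem_pvPairs m k j hjm).mp this, by simpa using hC⟩
      · rintro ⟨w, hw', hC⟩
        have hpm : (w, (j : Int)) ∈ pvPairs m := (mem_pvPairs m w j hjm).mpr hw'
        refine ⟨(w, wtp.getD w []), ?_, by simpa using hC, ?_⟩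
        · rw [hitems]
          exact List.mem_map.mpr ⟨w, (hkeys w).mpr (List.mem_map.mpr ⟨_, hpm, rfl⟩), rfl⟩
        · rw [hget]
          exact List.mem_map.mpr ⟨(w, (j : Int)), List.mem_filter.mpr ⟨hpm, by simp⟩, rfl⟩
  rw [hfailed, zip_filter_map m (fun p => p.2.all (fun w => pvCheck sent w))]
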